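-- pv_equiv track=rewrite | github.com/kbuchik/Advent-of-Code-2023 | 02_cube_conundrum.py | minimumSet
-- ===== SOURCE A (Python) =====
-- def minimumSet(g):
--     minset = {'red': 0, 'green': 0, 'blue': 0}
--     for pull in g:
--         pull = pull.split(', ')
--         for color in pull:
--             color = color.split(' ')
--             if color[1] not in ['red', 'green', 'blue']:
--                 continue
--             count = int(color[0])
--             if count > minset[color[1]]:
--                 minset[color[1]] = count
--     return minset
-- ===== SOURCE B (Python) =====
-- def minimumSet(g):
--     pairs = []
--     for pull in g:
--         for tok in pull.split(', '):
--             color = tok.split(' ')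
--             if color[1] in ('red', 'green', 'blue'):
--                 pairs.append((color[1], int(color[0])))
--     return {c: max([0] + [n for col, n in pairs if col == c])
--             for c in ('red', 'green', 'blue')}
-- ===== Notes on version B (the rewrite author's own statement) =====
-- stated objective: alternative
-- what changed: B first flattens the games into one list of (color, count) pairs and then computes each color's maximum by a per-color comprehension over that list, instead of A's single pass maintaining a running-max dict.
import Mathlib
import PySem

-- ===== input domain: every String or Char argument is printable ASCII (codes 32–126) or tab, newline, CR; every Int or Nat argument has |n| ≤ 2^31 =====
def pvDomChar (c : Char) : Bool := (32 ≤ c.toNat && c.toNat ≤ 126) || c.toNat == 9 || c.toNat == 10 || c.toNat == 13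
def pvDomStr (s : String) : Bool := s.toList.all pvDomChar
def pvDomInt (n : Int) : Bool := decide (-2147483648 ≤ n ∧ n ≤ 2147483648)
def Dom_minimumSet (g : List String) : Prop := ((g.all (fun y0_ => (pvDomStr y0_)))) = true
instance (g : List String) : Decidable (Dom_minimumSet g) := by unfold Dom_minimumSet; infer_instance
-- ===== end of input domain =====

-- B flattens the games into one list of (color, count) pairs and then computes each color's
-- maximum by a per-color scan over that list, instead of A's running-max dict (objective:
-- alternative decomposition, same cost).

-- ===== PORT A =====
-- one body of A's inner loop: split the token, guard on color[1], parse, running max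
def minimumSetStepA (minset : PySem.Dict String Int) (colorStr : String) : PySem.Dict String Int :=
  let color := (PySem.Str.split? colorStr " ").getD []
  match PySem.List.pyGet? color 1 with
  | none => minset                    -- Python raises IndexError here; excluded by Pre_
  | some c1 =>
    if ¬ (c1 ∈ ["red", "green", "blue"]) then minset
    else
      match PySem.Int.ofStr? (color.getD 0 "") with   -- color[0]: split always yields ≥ 1 piece
      | none => minset                -- Python raises ValueError here; excluded by Pre_
      | some count =>
        if count > minset.getD c1 0 then minset.insert c1 count else minset

def minimumSet (g : List String) : List (String × Int) :=
  (g.foldl (fun minset pull =>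
      ((PySem.Str.split? pull ", ").getD []).foldl minimumSetStepA minset)
    (PySem.Dict.ofList [("red", 0), ("green", 0), ("blue", 0)])).items

-- ===== PORT B =====
-- one token → optionally a (color, count) pair, same split/guard/parse order as the Python
def minimumSetPair? (tok : String) : Option (String × Int) :=
  let color := (PySem.Str.split? tok " ").getD []
  match PySem.List.pyGet? color 1 with
  | none => none                      -- Python raises IndexError here; excluded by Pre_
  | some c1 =>
    if c1 ∈ ["red", "green", "blue"] then
      match PySem.Int.ofStr? (color.getD 0 "") with
      | none => none                  -- Python raises ValueError here; excluded by Pre_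
      | some k => some (c1, k)
    else none

-- the flattening loop of Source B (append into `pairs`)
def minimumSetPairs (g : List String) : List (String × Int) :=
  g.flatMap (fun pull => ((PySem.Str.split? pull ", ").getD []).filterMap minimumSetPair?)

def minimumSet_alt (g : List String) : List (String × Int) :=
  let pairs := minimumSetPairs g
  ["red", "green", "blue"].map (fun c =>
    (c, (PySem.List.max? ((0 : Int) ::
          ((pairs.filter (fun p => p.1 == c)).map (fun p => p.2))) (fun x => x)).getD 0))

-- ===== PRECONDITION & SPEC =====
-- Pre_ excludes exactly the inputs where A raises: a token whose split-by-space has fewer than two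
-- pieces (IndexError on color[1]), or whose second piece is a color name but whose first piece is
-- not a Python int literal (ValueError on int(color[0])).
def Pre_minimumSet (g : List String) : Prop :=
  ∀ pull ∈ g, ∀ tok ∈ (PySem.Str.split? pull ", ").getD [],
    2 ≤ ((PySem.Str.split? tok " ").getD []).length ∧
    (((PySem.Str.split? tok " ").getD []).getD 1 "" ∈ (["red", "green", "blue"] : List String) →
      (PySem.Int.ofStr? (((PySem.Str.split? tok " ").getD []).getD 0 "")).isSome = true)
instance (g : List String) : Decidable (Pre_minimumSet g) := by unfold Pre_minimumSet; infer_instance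

def pvWitness_minimumSet : List String := ["3 blue, 4 red", "1 red, 2 green, 6 blue", "2 green"]

def Spec_minimumSet (g : List String) (out : List (String × Int)) : Prop := out = minimumSet_alt g
instance (g : List String) (out : List (String × Int)) : Decidable (Spec_minimumSet g out) := by unfold Spec_minimumSet; infer_instance

-- ===== CLAIM (what is proved, stated in full; the proofs are below) =====
def Claim_equal_minimumSet : Prop := ∀ (g : List String), Dom_minimumSet g → Pre_minimumSet g → Spec_minimumSet g (minimumSet g)

-- ===== LEMMAS AND PROOFS =====

-- abstract state for A: the per-color running maxima, realised as lists of collected counts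
def pvFmax (l : List Int) : Int := l.foldl max 0

def pvDA (L : List Int × List Int × List Int) : PySem.Dict String Int :=
  PySem.Dict.mk [("red", pvFmax L.1), ("green", pvFmax L.2.1), ("blue", pvFmax L.2.2)]

-- effect of one token on the abstract state, phrased via B's pair extractor
def pvUpd (L : List Int × List Int × List Int) (t : String) : List Int × List Int × List Int :=
  match minimumSetPair? t with
  | none => L
  | some (c1, k) =>
    if c1 = "red" then (L.1 ++ [k], L.2.1, L.2.2)
    else if c1 = "green" then (L.1, L.2.1 ++ [k], L.2.2)
    else if c1 = "blue" then (L.1, L.2.1, L.2.2 ++ [k])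
    else L

-- the counts recorded for color c among the collected pairs
def pvSel (c : String) (ps : List (String × Int)) : List Int :=
  (ps.filter (fun p => p.1 == c)).map (fun p => p.2)

lemma pvFmax_append (l : List Int) (k : Int) : pvFmax (l ++ [k]) = max (pvFmax l) k := by
  simp [pvFmax, List.foldl_append]

lemma pvPair_mem {t : String} {c : String} {k : Int}
    (h : minimumSetPair? t = some (c, k)) : c ∈ (["red", "green", "blue"] : List String) := by
  dsimp only [minimumSetPair?] at h
  split at h
  · exact absurd h (by simp)
  · split_ifs at h with hm
    split at h
    · exact absurd h (by simp)
    · simp only [Option.some.injEq, Prod.mk.injEq] at h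
      obtain ⟨h1, _⟩ := h; subst h1; exact hm

set_option maxHeartbeats 1600000 in
lemma pvStepA_eq (L : List Int × List Int × List Int) (t : String) :
    minimumSetStepA (pvDA L) t = pvDA (pvUpd L t) := by
  obtain ⟨lr, lg, lb⟩ := L
  simp only [minimumSetStepA, pvUpd, minimumSetPair?]
  cases hp : PySem.List.pyGet? ((PySem.Str.split? t " ").getD []) 1 with
  | none => rfl
  | some c1 =>
    dsimp only
    by_cases hm : c1 ∈ (["red", "green", "blue"] : List String)
    · rw [if_neg (not_not_intro hm), if_pos hm]
      cases hk : PySem.Int.ofStr? (((PySem.Str.split? t " ").getD []).getD 0 "") with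
      | none => rfl
      | some k =>
        dsimp only
        by_cases h1 : c1 = "red"
        · subst h1
          rw [show (pvDA (lr, lg, lb)).getD "red" 0 = pvFmax lr from rfl, if_pos rfl]
          by_cases h2 : k > pvFmax lr
          · rw [if_pos h2]
            show PySem.Dict.mk [("red", k), ("green", pvFmax lg), ("blue", pvFmax lb)] = _
            simp only [pvDA, pvFmax_append]
            rw [show max (pvFmax lr) k = k by omega]
          · rw [if_neg h2]
            simp only [pvDA, pvFmax_append]
            rw [show max (pvFmax lr) k = pvFmax lr by omega]
        · by_cases h2 : c1 = "green"
          · subst h2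
            rw [show (pvDA (lr, lg, lb)).getD "green" 0 = pvFmax lg from rfl,
              if_neg h1, if_pos rfl]
            by_cases h3 : k > pvFmax lg
            · rw [if_pos h3]
              show PySem.Dict.mk [("red", pvFmax lr), ("green", k), ("blue", pvFmax lb)] = _
              simp only [pvDA, pvFmax_append]
              rw [show max (pvFmax lg) k = k by omega]
            · rw [if_neg h3]
              simp only [pvDA, pvFmax_append]
              rw [show max (pvFmax lg) k = pvFmax lg by omega]
          · have h3 : c1 = "blue" := by
              have hm' : c1 = "red" ∨ c1 = "green" ∨ c1 = "blue" := by simpa using hm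
              tauto
            subst h3
            rw [show (pvDA (lr, lg, lb)).getD "blue" 0 = pvFmax lb from rfl,
              if_neg h1, if_neg h2, if_pos rfl]
            by_cases h4 : k > pvFmax lb
            · rw [if_pos h4]
              show PySem.Dict.mk [("red", pvFmax lr), ("green", pvFmax lg), ("blue", k)] = _
              simp only [pvDA, pvFmax_append]
              rw [show max (pvFmax lb) k = k by omega]
            · rw [if_neg h4]
              simp only [pvDA, pvFmax_append]
              rw [show max (pvFmax lb) k = pvFmax lb by omega]
    · rw [if_pos hm, if_neg hm]

lemma pvFoldA_eq (ts : List String) (L : List Int × List Int × List Int) :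
    ts.foldl minimumSetStepA (pvDA L) = pvDA (ts.foldl pvUpd L) := by
  induction ts generalizing L with
  | nil => rfl
  | cons t ts ih => simp [List.foldl_cons, pvStepA_eq, ih]

lemma pvOuterA (g : List String) (L : List Int × List Int × List Int) :
    g.foldl (fun m p => ((PySem.Str.split? p ", ").getD []).foldl minimumSetStepA m) (pvDA L)
      = pvDA (g.foldl (fun L p => ((PySem.Str.split? p ", ").getD []).foldl pvUpd L) L) := by
  induction g generalizing L with
  | nil => rfl
  | cons p g ih => simp only [List.foldl_cons, pvFoldA_eq, ih]

-- the abstract fold over tokens just appends B's selected counts, color by color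
lemma pvFold_sel (ts : List String) (L : List Int × List Int × List Int) :
    ts.foldl pvUpd L =
      (L.1 ++ pvSel "red" (ts.filterMap minimumSetPair?),
       L.2.1 ++ pvSel "green" (ts.filterMap minimumSetPair?),
       L.2.2 ++ pvSel "blue" (ts.filterMap minimumSetPair?)) := by
  induction ts generalizing L with
  | nil => simp [pvSel]
  | cons t ts ih =>
    obtain ⟨lr, lg, lb⟩ := L
    rw [List.foldl_cons, ih, List.filterMap_cons]
    cases hp : minimumSetPair? t with
    | none => simp [pvUpd, hp]
    | some p =>
      obtain ⟨c, k⟩ := p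
      have hm : c = "red" ∨ c = "green" ∨ c = "blue" := by simpa using pvPair_mem hp
      simp only [pvUpd, hp]
      rcases hm with h | h | h <;>
        (subst h; simp [pvSel])

lemma pvSel_append (c : String) (a b : List (String × Int)) :
    pvSel c (a ++ b) = pvSel c a ++ pvSel c b := by
  simp [pvSel]

lemma pvOuterSel (g : List String) (L : List Int × List Int × List Int) :
    g.foldl (fun L p => ((PySem.Str.split? p ", ").getD []).foldl pvUpd L) L =
      (L.1 ++ pvSel "red" (minimumSetPairs g),
       L.2.1 ++ pvSel "green" (minimumSetPairs g),
       L.2.2 ++ pvSel "blue" (minimumSetPairs g)) := by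
  induction g generalizing L with
  | nil => simp [minimumSetPairs, pvSel]
  | cons p g ih =>
    obtain ⟨lr, lg, lb⟩ := L
    rw [List.foldl_cons, pvFold_sel, ih]
    simp [minimumSetPairs, List.flatMap_cons, pvSel_append, List.append_assoc]

lemma pvMax0_eq (l : List Int) :
    (PySem.List.max? ((0 : Int) :: l) (fun x => x)).getD 0 = pvFmax l := by
  rw [PySem.List.max?_id_cons]
  rfl

-- ===== VERDICT (by name: the statement is the Claim_ definition above) =====
theorem minimumSet_spec : Claim_equal_minimumSet := by
  intro g _ _
  unfold Spec_minimumSet minimumSet minimumSet_alt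
  rw [show (PySem.Dict.ofList [("red", (0 : Int)), ("green", 0), ("blue", 0)]) = pvDA ([], [], []) from rfl,
    pvOuterA, pvOuterSel]
  simp [pvDA, List.map_cons, pvMax0_eq, pvSel]
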